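-- pv_equiv track=rewrite | github.com/mokrunka/CodeWars | EncryptThis.py | encrypt_this
-- ===== SOURCE A (Python) =====
-- def encrypt_this(text):
--     # split the string into a list of discrete words
--     listOfWords = text.split()
--
--     encryptedWordList = []
--     for word in listOfWords:
--         if len(word) < 3:
--             encryptedWordList.append(word)
--         else:
--             newWord = word[0] + word[int(len(word)) - 1] + word[2:int(len(word)) - 1] + word[1]
--             encryptedWordList.append(newWord)
--
--     finalEncryptedWordList = []
--     for word in encryptedWordList:
--         asciiWord = str(ord(word[0])) + word[1:]
--         finalEncryptedWordList.append(asciiWord)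
--
--     encryptedString = ''
--     for word in finalEncryptedWordList:
--         encryptedString += word + ' '
--
--     encryptedString = encryptedString.rstrip(' ')
--
--     return encryptedString
-- ===== SOURCE B (Python) =====
-- def encrypt_this(text):
--     # Single character-level scan: no split(), no join-of-words; words are cut out
--     # of the raw string one at a time, the 2nd/last characters are swapped IN PLACE
--     # on a char list, and the output buffer is grown with explicit separators.
--     out = []
--     i = 0
--     n = len(text)
--     while i < n:
--         if text[i].isspace():
--             i += 1
--             continue
--         j = i
--         while j < n and not text[j].isspace():
--             j += 1
--         w = list(text[i:j])
--         if len(w) >= 3: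
--             w[1], w[len(w) - 1] = w[len(w) - 1], w[1]
--         if out:
--             out.append(' ')
--         out.append(str(ord(w[0])))
--         out.extend(w[1:])
--         i = j
--     return ''.join(out)
-- ===== Notes on version B (the rewrite author's own statement) =====
-- stated objective: alternative
-- what changed: Replaces A's split()-then-three-list-passes-then-rstrip pipeline by a single character-level scan over the raw string that cuts each word out in place, swaps its 2nd/last characters by list assignment instead of rebuilding the word from four slices, and appends to one flat output buffer with explicit separators (no split, no trailing-space strip).
import Mathlib
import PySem

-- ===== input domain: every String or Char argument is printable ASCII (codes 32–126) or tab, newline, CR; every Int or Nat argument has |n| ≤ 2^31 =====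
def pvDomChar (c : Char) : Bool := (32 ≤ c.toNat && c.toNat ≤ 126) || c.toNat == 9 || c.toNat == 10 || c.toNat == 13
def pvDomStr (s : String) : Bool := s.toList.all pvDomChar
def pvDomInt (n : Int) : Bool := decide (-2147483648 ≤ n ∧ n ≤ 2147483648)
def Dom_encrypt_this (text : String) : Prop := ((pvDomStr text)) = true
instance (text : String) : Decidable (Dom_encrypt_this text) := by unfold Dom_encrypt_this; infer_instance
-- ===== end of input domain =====

-- B replaces A's split()-plus-three-passes-plus-rstrip pipeline by one character-level
-- scan over the raw string with an in-place 2nd/last swap per word (objective: alternative).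

-- hand port of s.rstrip(' '): drop exactly the trailing ' ' characters (exact: rstrip with an explicit char set {' '})
def pvRstripSp (x : List Char) : List Char := (x.reverse.dropWhile (fun c => c == ' ')).reverse

-- ===== PORT A =====
-- (word indexing uses pyGetD: every index A takes is in range, since words from split() are nonempty
--  and the swap branch only runs for len ≥ 3, so the default is never read)
def encrypt_this (text : String) : String :=
  let listOfWords := (PySem.Str.split₀ text).map String.toList
  let encryptedWordList := listOfWords.foldl (fun acc word =>
    if word.length < 3 then acc ++ [word]
    else acc ++ [[PySem.List.pyGetD word 0 ' '] ++ [PySem.List.pyGetD word ((word.length : Int) - 1) ' ']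
      ++ PySem.List.slice word (some 2) (some ((word.length : Int) - 1)) ++ [PySem.List.pyGetD word 1 ' ']]) []
  let finalEncryptedWordList := encryptedWordList.foldl (fun acc word =>
    acc ++ [PySem.Int.toChars (((PySem.List.pyGetD word 0 ' ').toNat : Int)) ++ PySem.List.slice word (some 1) none]) []
  let encryptedString := finalEncryptedWordList.foldl (fun s word => s ++ word ++ [' ']) []
  String.ofList (pvRstripSp encryptedString)

-- ===== PORT B =====
-- B scans the raw characters once: the outer while-loop over the index i is the structural
-- recursion on the remaining suffix; the inner while-loop that advances j to the first
-- whitespace computes exactly takeWhile/dropWhile of the not-isspace predicate (rest[i:j] /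
-- rest[j:]); the simultaneous assignment w[1], w[len-1] = w[len-1], w[1] is the two List.set
-- writes reading from the original w0 (index len(w)-1 is in range since len ≥ 3, exact);
-- the output buffer out grows flat, with a ' ' separator appended whenever out is nonempty.
def pvGoB (rest : List Char) (out : List Char) : List Char :=
  match rest with
  | [] => out
  | c :: tl =>
    if _h : PySem.Chars.isspace c then pvGoB tl out
    else
      let w0 := (c :: tl).takeWhile (fun d => !PySem.Chars.isspace d)
      let w := if 3 ≤ w0.length then
          (w0.set 1 (PySem.List.pyGetD w0 ((w0.length : Int) - 1) ' ')).set (w0.length - 1)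
            (PySem.List.pyGetD w0 1 ' ')
        else w0
      pvGoB ((c :: tl).dropWhile (fun d => !PySem.Chars.isspace d))
        ((if out.isEmpty then out else out ++ [' ']) ++
          PySem.Int.toChars (((PySem.List.pyGetD w 0 ' ').toNat : Int)) ++ PySem.List.slice w (some 1) none)
termination_by rest.length
decreasing_by
  · simp
  · rw [List.dropWhile_cons, if_pos (by simp [_h])]
    have := List.length_dropWhile_le (fun d => !PySem.Chars.isspace d) tl
    simp
    omega

def encrypt_this_alt (text : String) : String := String.ofList (pvGoB text.toList [])

-- ===== PRECONDITION & SPEC =====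
def Spec_encrypt_this (text : String) (out : String) : Prop := out = encrypt_this_alt text
instance (text : String) (out : String) : Decidable (Spec_encrypt_this text out) := by unfold Spec_encrypt_this; infer_instance

-- ===== CLAIM (what is proved, stated in full; the proofs are below) =====
def Claim_equal_encrypt_this : Prop := ∀ (text : String), Dom_encrypt_this text → Spec_encrypt_this text (encrypt_this text)

-- ===== LEMMAS AND PROOFS =====

-- the normalized per-word encoder both ports compute (A via slices, B via in-place swap)
def pvEncW (w : List Char) : List Char :=
  let w' := if 3 ≤ w.length then
      [PySem.List.pyGetD w 0 ' '] ++ [PySem.List.pyGetD w ((w.length : Int) - 1) ' ']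
        ++ PySem.List.slice w (some 2) (some ((w.length : Int) - 1)) ++ [PySem.List.pyGetD w 1 ' ']
    else w
  PySem.Int.toChars (((PySem.List.pyGetD w' 0 ' ').toNat : Int)) ++ PySem.List.slice w' (some 1) none

-- B's per-word value, as pvGoB builds it
def pvEncWB (w0 : List Char) : List Char :=
  let w := if 3 ≤ w0.length then
      (w0.set 1 (PySem.List.pyGetD w0 ((w0.length : Int) - 1) ' ')).set (w0.length - 1)
        (PySem.List.pyGetD w0 1 ' ')
    else w0
  PySem.Int.toChars (((PySem.List.pyGetD w 0 ' ').toNat : Int)) ++ PySem.List.slice w (some 1) none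

lemma pvFoldlJoinSp (l : List (List Char)) : ∀ (s : List Char),
    l.foldl (fun s w => s ++ w ++ [' ']) s = s ++ (l.map (fun w => w ++ [' '])).flatten := by
  induction l with
  | nil => intro s; simp
  | cons w ws ih => intro s; simp [List.append_assoc]

lemma pvDigitChar_ne (m : Nat) (h : m < 10) : Nat.digitChar m ≠ ' ' := by
  interval_cases m <;> decide

lemma pvToDigitsCoreEq (fuel n : Nat) (ds : List Char) : Nat.toDigitsCore 10 (fuel+1) n ds =
    if n / 10 = 0 then (n % 10).digitChar :: ds
    else Nat.toDigitsCore 10 fuel (n / 10) ((n % 10).digitChar :: ds) := by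
  rw [Nat.toDigitsCore]

lemma pvToDigitsCore (fuel : Nat) : ∀ (n : Nat) (ds : List Char), ∃ t,
    Nat.toDigitsCore 10 fuel n ds = t ++ ds ∧ (∀ c ∈ t, c ≠ ' ') ∧ (fuel ≠ 0 → t ≠ []) := by
  induction fuel with
  | zero => intro n ds; exact ⟨[], by simp [Nat.toDigitsCore], by simp, by simp⟩
  | succ fuel ih =>
    intro n ds
    rw [pvToDigitsCoreEq]
    by_cases h : n / 10 = 0
    · refine ⟨[(n % 10).digitChar], by simp [h], ?_, by simp⟩
      intro c hc; simp at hc; subst hc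
      exact pvDigitChar_ne _ (Nat.mod_lt _ (by norm_num))
    · obtain ⟨t, ht, hsp, _⟩ := ih (n / 10) ((n % 10).digitChar :: ds)
      refine ⟨t ++ [(n % 10).digitChar], ?_, ?_, by simp⟩
      · rw [if_neg h, ht]; simp
      · intro c hc
        rcases List.mem_append.mp hc with h1 | h2
        · exact hsp c h1
        · simp at h2; subst h2
          exact pvDigitChar_ne _ (Nat.mod_lt _ (by norm_num))

lemma pvToChars_prop (n : Int) (h : 0 ≤ n) :
    PySem.Int.toChars n ≠ [] ∧ ∀ c ∈ PySem.Int.toChars n, c ≠ ' ' := by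
  obtain ⟨t, ht, hsp, hne⟩ := pvToDigitsCore (n.toNat + 1) n.toNat []
  have he : PySem.Int.toChars n = t := by
    simp [PySem.Int.toChars, not_lt.mpr h, Nat.toDigits, ht]
  rw [he]
  exact ⟨hne (by omega), hsp⟩

lemma pvSplitGoWords (s : List Char) : ∀ (cur : List Char) (acc : List (List Char)),
    (∀ w ∈ acc, w ≠ [] ∧ ∀ c ∈ w, PySem.Chars.isspace c = false) →
    (∀ c ∈ cur, PySem.Chars.isspace c = false) →
    ∀ w ∈ PySem.Chars.split₀.go s cur acc, w ≠ [] ∧ ∀ c ∈ w, PySem.Chars.isspace c = false := by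
  induction s with
  | nil =>
    intro cur acc hacc hcur w hw
    simp only [PySem.Chars.split₀.go] at hw
    split at hw
    · exact hacc w (List.mem_reverse.mp hw)
    · next hemp =>
      rcases List.mem_cons.mp (List.mem_reverse.mp hw) with h1 | h2
      · subst h1
        refine ⟨?_, ?_⟩
        · intro hc
          exact hemp (by simp [List.isEmpty_iff, ← List.reverse_eq_nil_iff, hc])
        · intro c hc; exact hcur c (List.mem_reverse.mp hc)
      · exact hacc w h2
  | cons c rest ih =>
    intro cur acc hacc hcur w hw
    simp only [PySem.Chars.split₀.go] at hw
    split at hw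
    · split at hw
      · exact ih [] acc hacc (by simp) w hw
      · next hemp =>
        refine ih [] (cur.reverse :: acc) ?_ (by simp) w hw
        intro u hu
        rcases List.mem_cons.mp hu with h1 | h2
        · subst h1
          refine ⟨?_, ?_⟩
          · intro hc
            exact hemp (by simp [List.isEmpty_iff, ← List.reverse_eq_nil_iff, hc])
          · intro d hd; exact hcur d (List.mem_reverse.mp hd)
        · exact hacc u h2
    · refine ih (c :: cur) acc hacc ?_ w hw
      intro d hd
      rcases List.mem_cons.mp hd with h1 | h2
      · subst h1; simp_all
      · exact hcur d h2

lemma pvWords_prop (s : List Char) :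
    ∀ w ∈ PySem.Chars.split₀ s, w ≠ [] ∧ ∀ c ∈ w, PySem.Chars.isspace c = false := by
  intro w hw
  exact pvSplitGoWords s [] [] (by simp) (by simp) w hw

lemma pvRstrip_eq_self (x : List Char) (h : ∀ c ∈ x, c ≠ ' ') : pvRstripSp x = x := by
  unfold pvRstripSp
  have hd : x.reverse.dropWhile (fun c => c == ' ') = x.reverse := by
    cases hx : x.reverse with
    | nil => simp
    | cons b bs =>
      have hb : b ∈ x := List.mem_reverse.mp (by rw [hx]; simp)
      rw [List.dropWhile_cons, if_neg (by simp [h b hb])]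
  rw [hd, List.reverse_reverse]

lemma pvRstrip_append (a b : List Char) (h : pvRstripSp b ≠ []) :
    pvRstripSp (a ++ b) = a ++ pvRstripSp b := by
  unfold pvRstripSp at *
  rw [List.reverse_append, List.dropWhile_append]
  have hne : (b.reverse.dropWhile (fun c => c == ' ')).isEmpty = false := by
    rw [List.isEmpty_eq_false_iff]
    intro hc; rw [hc] at h; simp at h
  rw [hne]
  simp

lemma pvIntercalate_cons (w : List Char) (ws : List (List Char)) (h : ws ≠ []) :
    List.intercalate [' '] (w :: ws) = w ++ [' '] ++ List.intercalate [' '] ws := by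
  cases ws with
  | nil => simp_all
  | cons b bs => simp [List.intercalate, List.intersperse]

lemma pvJoin (l : List (List Char)) (h : ∀ w ∈ l, w ≠ [] ∧ pvRstripSp w = w) :
    pvRstripSp ((l.map (fun w => w ++ [' '])).flatten) = List.intercalate [' '] l := by
  induction l with
  | nil => simp [pvRstripSp, List.intercalate]
  | cons w ws ih =>
    obtain ⟨hwne, hwr⟩ := h w (by simp)
    cases ws with
    | nil =>
      simp only [List.map_cons, List.map_nil, List.flatten_cons, List.flatten_nil, List.append_nil]
      have hst : pvRstripSp (w ++ [' ']) = pvRstripSp w := by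
        unfold pvRstripSp
        simp
      rw [hst, hwr]
      simp [List.intercalate]
    | cons v vs =>
      have hrec := ih (fun u hu => h u (by simp [hu]))
      have hne : pvRstripSp (((v :: vs).map (fun w => w ++ [' '])).flatten) ≠ [] := by
        rw [hrec]
        obtain ⟨hv, _⟩ := h v (by simp)
        cases vs with
        | nil => simpa [List.intercalate]
        | cons u us =>
          rw [pvIntercalate_cons v (u :: us) (by simp)]
          simp
      have hflat : ((w :: v :: vs).map (fun w => w ++ [' '])).flatten
          = (w ++ [' ']) ++ ((v :: vs).map (fun w => w ++ [' '])).flatten := by simp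
      rw [hflat, pvRstrip_append _ _ hne, hrec, pvIntercalate_cons w (v :: vs) (by simp)]

lemma pvWordEq (w : List Char) :
    PySem.Int.toChars (((PySem.List.pyGetD (if w.length < 3 then w else
        [PySem.List.pyGetD w 0 ' '] ++ [PySem.List.pyGetD w ((w.length : Int) - 1) ' ']
          ++ PySem.List.slice w (some 2) (some ((w.length : Int) - 1)) ++ [PySem.List.pyGetD w 1 ' '])
        0 ' ').toNat : Int))
      ++ PySem.List.slice (if w.length < 3 then w else
        [PySem.List.pyGetD w 0 ' '] ++ [PySem.List.pyGetD w ((w.length : Int) - 1) ' ']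
          ++ PySem.List.slice w (some 2) (some ((w.length : Int) - 1)) ++ [PySem.List.pyGetD w 1 ' '])
        (some 1) none
    = pvEncW w := by
  by_cases hlen : w.length < 3
  · rw [if_pos hlen]
    simp only [pvEncW]
    rw [if_neg (by omega)]
  · rw [if_neg hlen]
    simp only [pvEncW]
    rw [if_pos (by omega)]

-- slice / pyGetD normal forms used by the per-word equality
lemma pvSliceMid (w : List Char) (h : 3 ≤ w.length) :
    PySem.List.slice w (some 2) (some ((w.length : Int) - 1)) = (w.drop 2).take (w.length - 3) := by
  simp only [PySem.List.slice, PySem.List.clampIdx]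
  rw [if_neg (by omega)]
  norm_num
  rw [show Int.toNat 2 = 2 from rfl, min_eq_left (by omega : 2 ≤ w.length)]
  have e : w.length - 1 - 2 = w.length - 3 := by omega
  rw [e]

lemma pvSliceSubset (w : List Char) (a b : Option Int) (c : Char)
    (h : c ∈ PySem.List.slice w a b) : c ∈ w := by
  simp only [PySem.List.slice] at h
  exact List.mem_of_mem_drop (List.mem_of_mem_take h)

-- the in-place swap builds exactly A's four-slice word
lemma pvSwapEq (w : List Char) (h : 3 ≤ w.length) :
    (w.set 1 (PySem.List.pyGetD w ((w.length : Int) - 1) ' ')).set (w.length - 1)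
        (PySem.List.pyGetD w 1 ' ')
    = [PySem.List.pyGetD w 0 ' '] ++ [PySem.List.pyGetD w ((w.length : Int) - 1) ' ']
        ++ PySem.List.slice w (some 2) (some ((w.length : Int) - 1)) ++ [PySem.List.pyGetD w 1 ' '] := by
  have hlast : PySem.List.pyGetD w ((w.length : Int) - 1) ' ' = w[w.length - 1]'(by omega) := by
    rw [PySem.List.pyGetD_eq_getElem w ' ' (by omega) (by omega)]
    congr 1
    omega
  have h1 : PySem.List.pyGetD w 1 ' ' = w[1]'(by omega) := by
    rw [PySem.List.pyGetD_eq_getElem w ' ' (by omega) (by omega)]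
    rfl
  have h0 : PySem.List.pyGetD w 0 ' ' = w[0]'(by omega) := by
    rw [PySem.List.pyGetD_eq_getElem w ' ' (by omega) (by omega)]
    rfl
  rw [hlast, h1, h0, pvSliceMid w h]
  apply List.ext_getElem
  · simp [List.length_set]
    omega
  · intro i hi1 hi2
    simp only [List.length_set] at hi1
    simp only [List.getElem_set]
    rcases Nat.lt_or_ge i 2 with h2 | h2
    · interval_cases i
      · rw [if_neg (by omega), if_neg (by omega)]
        simp
      · rw [if_neg (by omega), if_pos rfl]
        simp
    · by_cases hC : i = w.length - 1
      · rw [if_pos hC.symm]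
        subst hC
        rw [List.getElem_append_right (by simp; omega)]
        simp
      · rw [if_neg (by omega), if_neg (by omega)]
        rw [List.getElem_append_left (by simp; omega), List.getElem_append_right (by simp; omega)]
        simp
        congr 1
        omega

-- B's per-word value equals the normalized encoder on nonempty words
lemma pvEncWB_eq (w : List Char) (hne : w ≠ []) : pvEncWB w = pvEncW w := by
  by_cases h : 3 ≤ w.length
  · simp only [pvEncWB, pvEncW, if_pos h]
    rw [pvSwapEq w h]
  · simp only [pvEncWB, pvEncW, if_neg h]

lemma pvEncW_prop (w : List Char) (hne : w ≠ []) (hs : ∀ c ∈ w, PySem.Chars.isspace c = false) :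
    pvEncW w ≠ [] ∧ pvRstripSp (pvEncW w) = pvEncW w := by
  have hsp : ∀ c ∈ w, c ≠ ' ' := by
    intro c hc heq
    have := hs c hc
    rw [heq] at this
    simp [PySem.Chars.isspace] at this
  have hwlen : 1 ≤ w.length := by
    cases w with
    | nil => simp at hne
    | cons a l => simp
  have hW' : ∀ c ∈ (if 3 ≤ w.length then
      [PySem.List.pyGetD w 0 ' '] ++ [PySem.List.pyGetD w ((w.length : Int) - 1) ' ']
        ++ PySem.List.slice w (some 2) (some ((w.length : Int) - 1)) ++ [PySem.List.pyGetD w 1 ' ']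
    else w), c ∈ w := by
    intro c hc
    split at hc
    · next h3 =>
      simp only [List.append_assoc, List.mem_append, List.mem_singleton] at hc
      rcases hc with h | h | h | h
      · subst h
        exact PySem.List.pyGetD_mem w ' ' (by simp [PySem.Raise.InRange]; omega)
      · subst h
        exact PySem.List.pyGetD_mem w ' ' (by simp [PySem.Raise.InRange]; omega)
      · exact pvSliceSubset w _ _ c h
      · subst h
        exact PySem.List.pyGetD_mem w ' ' (by simp [PySem.Raise.InRange]; omega)
    · exact hc
  have hAll : ∀ c ∈ pvEncW w, c ≠ ' ' := by
    intro c hc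
    unfold pvEncW at hc
    rcases List.mem_append.mp hc with h | h
    · exact (pvToChars_prop _ (by positivity)).2 c h
    · exact hsp c (hW' c (pvSliceSubset _ _ _ c h))
  refine ⟨?_, pvRstrip_eq_self _ hAll⟩
  unfold pvEncW
  intro hc
  rcases List.append_eq_nil_iff.mp hc with ⟨h1, _⟩
  exact (pvToChars_prop _ (by positivity)).1 h1

-- === characterization of split₀ as takeWhile/dropWhile steps ===

lemma pvSplitGoAcc (s : List Char) : ∀ (cur : List Char) (acc : List (List Char)),
    PySem.Chars.split₀.go s cur acc = acc.reverse ++ PySem.Chars.split₀.go s cur [] := by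
  induction s with
  | nil =>
    intro cur acc
    simp only [PySem.Chars.split₀.go]
    split <;> simp
  | cons c tl ih =>
    intro cur acc
    simp only [PySem.Chars.split₀.go]
    split
    · split
      · exact ih [] acc
      · rw [ih [] (cur.reverse :: acc), ih [] [cur.reverse]]
        simp
    · exact ih (c :: cur) acc

lemma pvSplitGoTake (s : List Char) : ∀ (cur : List Char) (acc : List (List Char)),
    PySem.Chars.split₀.go s cur acc
      = PySem.Chars.split₀.go (s.dropWhile (fun d => !PySem.Chars.isspace d))
          ((s.takeWhile (fun d => !PySem.Chars.isspace d)).reverse ++ cur) acc := by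
  induction s with
  | nil => intro cur acc; simp
  | cons c tl ih =>
    intro cur acc
    by_cases hc : PySem.Chars.isspace c
    · simp [hc]
    · have hstep : PySem.Chars.split₀.go (c :: tl) cur acc
          = PySem.Chars.split₀.go tl (c :: cur) acc := by
        simp only [PySem.Chars.split₀.go]
        rw [if_neg (by simp [hc])]
      rw [hstep, ih (c :: cur) acc]
      simp [hc]

lemma pvSplitSpace (c : Char) (s : List Char) (h : PySem.Chars.isspace c = true) :
    PySem.Chars.split₀ (c :: s) = PySem.Chars.split₀ s := by
  simp only [PySem.Chars.split₀, PySem.Chars.split₀.go]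
  rw [if_pos (by simp [h])]
  simp

lemma pvSplitWord (c : Char) (s : List Char) (h : PySem.Chars.isspace c = false) :
    PySem.Chars.split₀ (c :: s)
      = ((c :: s).takeWhile (fun d => !PySem.Chars.isspace d))
        :: PySem.Chars.split₀ ((c :: s).dropWhile (fun d => !PySem.Chars.isspace d)) := by
  have hwne : (c :: s).takeWhile (fun d => !PySem.Chars.isspace d) ≠ [] := by
    rw [List.takeWhile_cons, if_pos (by simp [h])]
    simp
  show PySem.Chars.split₀.go (c :: s) [] [] = _
  rw [pvSplitGoTake (c :: s) [] [], List.append_nil]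
  cases hr : (c :: s).dropWhile (fun d => !PySem.Chars.isspace d) with
  | nil =>
    simp only [PySem.Chars.split₀.go]
    rw [if_neg (by simp [List.isEmpty_iff, hwne])]
    simp [PySem.Chars.split₀, PySem.Chars.split₀.go]

  | cons d r' =>
    have hd : PySem.Chars.isspace d = true := by
      have h2 := List.head_dropWhile_not (fun d => !PySem.Chars.isspace d)
        (l := c :: s) (by rw [hr]; simp)
      simp only [hr, List.head_cons] at h2
      simpa using h2
    simp only [PySem.Chars.split₀.go]
    rw [if_pos (by simp [hd]), if_neg (by simp [List.isEmpty_iff, hwne])]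
    rw [List.reverse_reverse,
        pvSplitGoAcc r' [] [(c :: s).takeWhile (fun d => !PySem.Chars.isspace d)],
        pvSplitSpace d r' hd]
    simp [PySem.Chars.split₀]

-- intercalate with a single-space separator, flattened form
lemma pvInterFlat (l : List (List Char)) (x : List Char) :
    List.intercalate [' '] (x :: l) = x ++ (l.map (fun v => ' ' :: v)).flatten := by
  induction l generalizing x with
  | nil => simp [List.intercalate]
  | cons y l ih =>
    rw [pvIntercalate_cons x (y :: l) (by simp), ih y]
    simp

-- the scanner computes the space-joined encoded words
lemma pvGoB_spec : ∀ (N : Nat) (s : List Char), s.length ≤ N → ∀ out : List Char,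
    pvGoB s out = if out.isEmpty
      then List.intercalate [' '] ((PySem.Chars.split₀ s).map pvEncWB)
      else out ++ (((PySem.Chars.split₀ s).map pvEncWB).map (fun v => ' ' :: v)).flatten := by
  intro N
  induction N with
  | zero =>
    intro s hs out
    have : s = [] := List.eq_nil_of_length_eq_zero (by omega)
    subst this
    rw [pvGoB]
    simp [PySem.Chars.split₀, PySem.Chars.split₀.go, List.intercalate]
  | succ N ih =>
    intro s hs out
    cases s with
    | nil =>
      rw [pvGoB]
      simp [PySem.Chars.split₀, PySem.Chars.split₀.go, List.intercalate]
    | cons c tl =>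
      rw [pvGoB]
      by_cases hc : PySem.Chars.isspace c
      · rw [dif_pos hc, pvSplitSpace c tl hc]
        exact ih tl (by simp at hs; omega) out
      · rw [dif_neg hc]
        have hwB : pvEncWB ((c :: tl).takeWhile (fun d => !PySem.Chars.isspace d)) ≠ [] := by
          simp only [pvEncWB]
          intro hcon
          rcases List.append_eq_nil_iff.mp hcon with ⟨hh, _⟩
          exact (pvToChars_prop _ (by positivity)).1 hh
        have hdrop : ((c :: tl).dropWhile (fun d => !PySem.Chars.isspace d)).length ≤ N := by
          rw [List.dropWhile_cons, if_pos (by simp [hc])]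
          have := List.length_dropWhile_le (fun d => !PySem.Chars.isspace d) tl
          simp at hs
          omega
        rw [ih _ hdrop]
        rw [pvSplitWord c tl (by simpa using hc)]
        have hout' : ((if out.isEmpty then out else out ++ [' ']) ++
            PySem.Int.toChars (((PySem.List.pyGetD (if 3 ≤ ((c :: tl).takeWhile (fun d => !PySem.Chars.isspace d)).length then
                (((c :: tl).takeWhile (fun d => !PySem.Chars.isspace d)).set 1
                  (PySem.List.pyGetD ((c :: tl).takeWhile (fun d => !PySem.Chars.isspace d))
                    ((((c :: tl).takeWhile (fun d => !PySem.Chars.isspace d)).length : Int) - 1) ' ')).set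
                  (((c :: tl).takeWhile (fun d => !PySem.Chars.isspace d)).length - 1)
                  (PySem.List.pyGetD ((c :: tl).takeWhile (fun d => !PySem.Chars.isspace d)) 1 ' ')
              else (c :: tl).takeWhile (fun d => !PySem.Chars.isspace d)) 0 ' ').toNat : Int))
            ++ PySem.List.slice (if 3 ≤ ((c :: tl).takeWhile (fun d => !PySem.Chars.isspace d)).length then
                (((c :: tl).takeWhile (fun d => !PySem.Chars.isspace d)).set 1
                  (PySem.List.pyGetD ((c :: tl).takeWhile (fun d => !PySem.Chars.isspace d))
                    ((((c :: tl).takeWhile (fun d => !PySem.Chars.isspace d)).length : Int) - 1) ' ')).set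
                  (((c :: tl).takeWhile (fun d => !PySem.Chars.isspace d)).length - 1)
                  (PySem.List.pyGetD ((c :: tl).takeWhile (fun d => !PySem.Chars.isspace d)) 1 ' ')
              else (c :: tl).takeWhile (fun d => !PySem.Chars.isspace d)) (some 1) none)
          = (if out.isEmpty then out else out ++ [' ']) ++ pvEncWB ((c :: tl).takeWhile (fun d => !PySem.Chars.isspace d)) := by
          simp only [pvEncWB]
          simp [List.append_assoc]
        rw [hout']
        have hne' : ((if out.isEmpty then out else out ++ [' ']) ++
            pvEncWB ((c :: tl).takeWhile (fun d => !PySem.Chars.isspace d))).isEmpty = false := by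
          simp [List.isEmpty_iff]
          intro _
          exact hwB
        rw [if_neg (by simp [List.isEmpty_iff] at hne' ⊢; exact hne')]
        by_cases hout : out.isEmpty
        · rw [if_pos hout]
          have : out = [] := List.isEmpty_iff.mp hout
          subst this
          rw [List.map_cons, pvInterFlat]
          simp
        · rw [if_neg hout, if_neg hout]
          simp [List.append_assoc]

-- ===== VERDICT (by name: the statement is the Claim_ definition above) =====
theorem encrypt_this_spec : Claim_equal_encrypt_this := by
  intro text _
  unfold Spec_encrypt_this encrypt_this encrypt_this_alt
  rw [PySem.Str.split₀_map_toList]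
  dsimp only
  have hbody : (fun (acc : List (List Char)) word =>
      if word.length < 3 then acc ++ [word]
      else acc ++ [[PySem.List.pyGetD word 0 ' '] ++ [PySem.List.pyGetD word ((word.length : Int) - 1) ' ']
        ++ PySem.List.slice word (some 2) (some ((word.length : Int) - 1)) ++ [PySem.List.pyGetD word 1 ' ']])
      = fun acc word => acc ++ [if word.length < 3 then word else
        [PySem.List.pyGetD word 0 ' '] ++ [PySem.List.pyGetD word ((word.length : Int) - 1) ' ']
        ++ PySem.List.slice word (some 2) (some ((word.length : Int) - 1)) ++ [PySem.List.pyGetD word 1 ' ']] := by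
    funext acc word
    split <;> rfl
  rw [hbody, PySem.List.foldl_append_singleton_eq_map, List.nil_append,
      PySem.List.foldl_append_singleton_eq_map, List.nil_append,
      pvFoldlJoinSp, List.nil_append]
  have hmap : List.map (fun word => PySem.Int.toChars (((PySem.List.pyGetD word 0 ' ').toNat : Int))
        ++ PySem.List.slice word (some 1) none)
      (List.map (fun word => if word.length < 3 then word else
        [PySem.List.pyGetD word 0 ' '] ++ [PySem.List.pyGetD word ((word.length : Int) - 1) ' ']
          ++ PySem.List.slice word (some 2) (some ((word.length : Int) - 1)) ++ [PySem.List.pyGetD word 1 ' '])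
        (PySem.Chars.split₀ text.toList))
      = List.map pvEncW (PySem.Chars.split₀ text.toList) := by
    rw [List.map_map]
    apply List.map_congr_left
    intro w _
    exact pvWordEq w
  rw [hmap, pvJoin]
  · have hmapB : List.map pvEncW (PySem.Chars.split₀ text.toList)
        = List.map pvEncWB (PySem.Chars.split₀ text.toList) := by
      apply List.map_congr_left
      intro w hw
      exact (pvEncWB_eq w (pvWords_prop text.toList w hw).1).symm
    rw [hmapB, pvGoB_spec text.toList.length text.toList (le_refl _) []]
    simp
  · intro u hu
    obtain ⟨w, hw, hwu⟩ := List.mem_map.mp hu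
    obtain ⟨h1, h2⟩ := pvWords_prop text.toList w hw
    subst hwu
    exact pvEncW_prop w h1 h2
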